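-- pv_equiv track=rewrite | github.com/Jryx0601/CulTour_Ellison_and_Friends | Thesis_Codes/Back_End/Trip_planner.py | trip_planner
-- ===== SOURCE A (Python) =====
-- def trip_planner(tourist_Attaraction,Restaurant):
--     pattern = ['Attraction','Attraction','Restaurant','Attraction','Restaurant']
--     place_generated = []
--
--
--     Tourist_Attraction_Number = 0
--     Restaurant_Number = 0
--     for x in range(len(pattern)):
--         if pattern[x] == 'Attraction' and Tourist_Attraction_Number < len(tourist_Attaraction):
--             place_generated.append(tourist_Attaraction[Tourist_Attraction_Number])
--             Tourist_Attraction_Number += 1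
--         elif pattern[x] == 'Restaurant' and Restaurant_Number < len(Restaurant):
--             place_generated.append(Restaurant[Restaurant_Number])
--             Restaurant_Number += 1
--     return place_generated
-- ===== SOURCE B (Python) =====
-- def trip_planner(tourist_Attaraction, Restaurant):
--     a = list(tourist_Attaraction[:3])
--     r = list(Restaurant[:2])
--     return a[:2] + r[:1] + a[2:3] + r[1:2]
-- ===== Notes on version B (the rewrite author's own statement) =====
-- stated objective: simpler
-- what changed: Replaced the pattern-array loop with two counters by a closed-form concatenation of four bounded slices mirroring the fixed A,A,R,A,R pattern.
import Mathlib
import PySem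

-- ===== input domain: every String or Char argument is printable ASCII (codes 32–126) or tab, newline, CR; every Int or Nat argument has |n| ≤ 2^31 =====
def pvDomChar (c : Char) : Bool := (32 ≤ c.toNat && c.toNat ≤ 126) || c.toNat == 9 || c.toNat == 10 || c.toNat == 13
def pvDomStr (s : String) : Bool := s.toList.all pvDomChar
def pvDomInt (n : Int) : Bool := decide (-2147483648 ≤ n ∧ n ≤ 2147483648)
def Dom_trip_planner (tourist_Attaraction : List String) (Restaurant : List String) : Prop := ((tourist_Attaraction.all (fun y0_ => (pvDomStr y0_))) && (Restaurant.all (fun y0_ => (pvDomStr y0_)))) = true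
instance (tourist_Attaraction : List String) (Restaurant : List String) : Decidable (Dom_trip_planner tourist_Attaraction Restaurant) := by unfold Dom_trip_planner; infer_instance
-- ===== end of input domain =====

-- B replaces A's pattern-array loop with two counters by a closed-form concatenation of
-- four bounded slices (objective: simpler).

-- ===== PORT A =====
-- loop over the pattern list, carrying (place_generated, attraction counter, restaurant counter)
def trip_planner (tourist_Attaraction : List String) (Restaurant : List String) : List String :=
  let pattern : List String := ["Attraction", "Attraction", "Restaurant", "Attraction", "Restaurant"]
  let st := pattern.foldl
    (fun (st : List String × Nat × Nat) p =>
      let (pg, tn, rn) := st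
      if p = "Attraction" ∧ tn < tourist_Attaraction.length then
        (pg ++ [tourist_Attaraction.getD tn ""], tn + 1, rn)
      else if p = "Restaurant" ∧ rn < Restaurant.length then
        (pg ++ [Restaurant.getD rn ""], tn, rn + 1)
      else (pg, tn, rn))
    ([], 0, 0)
  st.1

-- ===== PORT B =====
def trip_planner_alt (tourist_Attaraction : List String) (Restaurant : List String) : List String :=
  let a := PySem.List.slice tourist_Attaraction none (some 3)
  let r := PySem.List.slice Restaurant none (some 2)
  PySem.List.slice a none (some 2) ++ PySem.List.slice r none (some 1)
    ++ PySem.List.slice a (some 2) (some 3) ++ PySem.List.slice r (some 1) (some 2)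

-- ===== PRECONDITION & SPEC =====
def Spec_trip_planner (tourist_Attaraction : List String) (Restaurant : List String) (out : List String) : Prop := out = trip_planner_alt tourist_Attaraction Restaurant
instance (tourist_Attaraction : List String) (Restaurant : List String) (out : List String) : Decidable (Spec_trip_planner tourist_Attaraction Restaurant out) := by unfold Spec_trip_planner; infer_instance

-- ===== CLAIM (what is proved, stated in full; the proofs are below) =====
def Claim_equal_trip_planner : Prop := ∀ (tourist_Attaraction : List String) (Restaurant : List String), Dom_trip_planner tourist_Attaraction Restaurant → Spec_trip_planner tourist_Attaraction Restaurant (trip_planner tourist_Attaraction Restaurant)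

-- ===== LEMMAS AND PROOFS =====
theorem trip_planner_eq_alt (a r : List String) :
    trip_planner a r = trip_planner_alt a r := by
  match a, r with
  | [], [] => rfl
  | [], [w] => rfl
  | [], w :: v :: _ => rfl
  | [x], [] => rfl
  | [x], [w] => rfl
  | [x], w :: v :: _ => rfl
  | [x, y], [] => rfl
  | [x, y], [w] => rfl
  | [x, y], w :: v :: _ => rfl
  | x :: y :: z :: _, [] => rfl
  | x :: y :: z :: _, [w] => rfl
  | x :: y :: z :: _, w :: v :: _ => rfl

-- ===== VERDICT (by name: the statement is the Claim_ definition above) =====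
theorem trip_planner_spec : Claim_equal_trip_planner := by
  intro a r _
  exact trip_planner_eq_alt a r
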